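-- pv_equiv track=rewrite | github.com/HCrescent/Advent-of-Code | 2015/Python/day03.py | deliver
-- ===== SOURCE A (Python) =====
-- def deliver(instructions):
-- 	houses = {"(0,0)": 1}
-- 	x = 0
-- 	y = 0
-- 	for each in instructions:
-- 		match each:
-- 			case '^':
-- 				y += 1
-- 			case '>':
-- 				x += 1
-- 			case 'v':
-- 				y -= 1
-- 			case '<':
-- 				x -= 1
-- 		if houses.get(f"({x},{y})") is None:
-- 			houses[f"({x},{y})"] = 0
-- 		# houses[f"({x},{y})"] += 1  # this line for knowing the number of presents delivered to each house
-- 	return set(houses)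
-- ===== SOURCE B (Python) =====
-- DELTA = {'^': (0, 1), '>': (1, 0), 'v': (0, -1), '<': (-1, 0)}
--
--
-- def scan(moves):
--     """Divide and conquer: return (total displacement of moves,
--     set of positions visited while following moves, relative to the start)."""
--     if len(moves) <= 1:
--         d = DELTA.get(moves, (0, 0))
--         return d, {(0, 0), d}
--     mid = len(moves) // 2
--     (ax, ay), left = scan(moves[:mid])
--     (bx, by), right = scan(moves[mid:])
--     return (ax + bx, ay + by), left | {(ax + px, ay + py) for px, py in right}
--
--
-- def deliver(instructions):
--     _, visited = scan(instructions)
--     return {f"({x},{y})" for x, y in visited}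
-- ===== Notes on version B (the rewrite author's own statement) =====
-- stated objective: alternative
-- what changed: B replaces A's single stateful walk with a branching match and a string-keyed dict by a divide-and-conquer scan that recursively computes (total displacement, set of visited offsets) for each half and merges them by translating the right half's offsets, formatting to strings only once at the end.
import Mathlib
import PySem

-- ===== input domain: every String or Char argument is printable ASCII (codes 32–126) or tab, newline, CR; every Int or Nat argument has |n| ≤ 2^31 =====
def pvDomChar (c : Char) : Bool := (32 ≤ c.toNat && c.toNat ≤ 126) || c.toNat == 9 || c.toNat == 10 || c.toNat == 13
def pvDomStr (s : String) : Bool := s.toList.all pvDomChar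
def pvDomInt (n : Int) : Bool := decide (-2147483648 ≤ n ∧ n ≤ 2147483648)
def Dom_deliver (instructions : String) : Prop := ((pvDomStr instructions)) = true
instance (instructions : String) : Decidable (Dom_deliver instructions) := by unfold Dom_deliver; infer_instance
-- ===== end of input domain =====

-- B replaces A's single stateful walk (match + string-keyed dict) by a divide-and-conquer scan
-- returning (total displacement, set of visited offsets) per half, merged by translating the
-- right half's offsets; strings are produced once at the end (alternative algorithm, same result).

-- f"({x},{y})" (both Pythons format positions this way)
def pvFmt (x y : Int) : String := "(" ++ PySem.Int.toStr x ++ "," ++ PySem.Int.toStr y ++ ")"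

-- ===== PORT A =====
def pvStepA (s : PySem.Dict String Int × Int × Int) (each : Char) :
    PySem.Dict String Int × Int × Int :=
  let houses := s.1
  let xy :=
    match each with
    | '^' => (s.2.1, s.2.2 + 1)
    | '>' => (s.2.1 + 1, s.2.2)
    | 'v' => (s.2.1, s.2.2 - 1)
    | '<' => (s.2.1 - 1, s.2.2)
    | _ => (s.2.1, s.2.2)
  let houses :=
    if (houses.get? (pvFmt xy.1 xy.2)).isNone then houses.insert (pvFmt xy.1 xy.2) 0
    else houses
  (houses, xy.1, xy.2)

def deliver (instructions : String) : List String :=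
  PySem.Set.ofList
    (instructions.toList.foldl pvStepA (PySem.Dict.ofList [("(0,0)", 1)], 0, 0)).1.keys

-- ===== PORT B =====
def pvDelta : PySem.Dict Char (Int × Int) :=
  PySem.Dict.ofList [('^', (0, 1)), ('>', (1, 0)), ('v', (0, -1)), ('<', (-1, 0))]

-- scan(moves): divide and conquer; moves[:mid] / moves[mid:] with 0 ≤ mid ≤ len are exactly take/drop
def pvScan : List Char → (Int × Int) × PySem.Set (Int × Int)
  | [] => ((0, 0), PySem.Set.ofList [((0 : Int), (0 : Int))])
  | [c] =>
      let d := pvDelta.getD c (0, 0)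
      (d, PySem.Set.ofList [(0, 0), d])
  | c1 :: c2 :: rest =>
      let cs := c1 :: c2 :: rest
      let mid := cs.length / 2
      let l := pvScan (cs.take mid)
      let r := pvScan (cs.drop mid)
      ((l.1.1 + r.1.1, l.1.2 + r.1.2),
       PySem.Set.union l.2 (PySem.Set.ofList (r.2.map (fun p => (l.1.1 + p.1, l.1.2 + p.2)))))
termination_by cs => cs.length
decreasing_by
  · simp [List.length_take]; omega
  · simp [List.length_drop]; omega

def deliver_alt (instructions : String) : List String :=
  PySem.Set.ofList ((pvScan instructions.toList).2.map (fun p => pvFmt p.1 p.2))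

-- ===== PRECONDITION & SPEC =====
def Spec_deliver (instructions : String) (out : List String) : Prop := out = deliver_alt instructions
instance (instructions : String) (out : List String) : Decidable (Spec_deliver instructions out) := by unfold Spec_deliver; infer_instance

-- ===== CLAIM (what is proved, stated in full; the proofs are below) =====
def Claim_equal_deliver : Prop := ∀ (instructions : String), Dom_deliver instructions → Spec_deliver instructions (deliver instructions)

-- ===== LEMMAS AND PROOFS =====

-- per-character displacement, and the list of positions visited (start included)
def pvD (c : Char) : Int × Int := pvDelta.getD c (0, 0)

def pvAfter : List Char → Int → Int → List (Int × Int)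
  | [], _, _ => []
  | c :: cs, x, y => (x + (pvD c).1, y + (pvD c).2) :: pvAfter cs (x + (pvD c).1) (y + (pvD c).2)

def pvPos (cs : List Char) (x y : Int) : List (Int × Int) := (x, y) :: pvAfter cs x y

def pvDel : List Char → Int × Int
  | [] => (0, 0)
  | c :: cs => ((pvD c).1 + (pvDel cs).1, (pvD c).2 + (pvDel cs).2)

theorem pvPos_cons (c : Char) (cs : List Char) (x y : Int) :
    pvPos (c :: cs) x y = (x, y) :: pvPos cs (x + (pvD c).1) (y + (pvD c).2) := rfl

-- A's match computes exactly the delta-table add of pvD.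
theorem pv_move_eq (x y : Int) (c : Char) :
    (match c with
     | '^' => (x, y + 1)
     | '>' => (x + 1, y)
     | 'v' => (x, y - 1)
     | '<' => (x - 1, y)
     | _ => (x, y))
    = (x + (pvD c).1, y + (pvD c).2) := by
  by_cases h1 : c = '^'
  · subst h1
    have hd : pvD '^' = (0, 1) := by decide
    rw [hd]; simp
  by_cases h2 : c = '>'
  · subst h2
    have hd : pvD '>' = (1, 0) := by decide
    rw [hd]; simp
  by_cases h3 : c = 'v'
  · subst h3
    have hd : pvD 'v' = (0, -1) := by decide
    rw [hd]; simp; ring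
  by_cases h4 : c = '<'
  · subst h4
    have hd : pvD '<' = (-1, 0) := by decide
    rw [hd]; simp; ring
  · have hit : pvDelta.items = [('^', (0, 1)), ('>', (1, 0)), ('v', (0, -1)), ('<', (-1, 0))] := by
      decide
    have e1 : ('^' == c) = false := beq_eq_false_iff_ne.mpr (Ne.symm h1)
    have e2 : ('>' == c) = false := beq_eq_false_iff_ne.mpr (Ne.symm h2)
    have e3 : ('v' == c) = false := beq_eq_false_iff_ne.mpr (Ne.symm h3)
    have e4 : ('<' == c) = false := beq_eq_false_iff_ne.mpr (Ne.symm h4)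
    have hd : pvD c = (0, 0) := by
      simp [pvD, PySem.Dict.getD, PySem.Dict.get?, hit, e1, e2, e3, e4]
    rw [hd]
    simp

-- A's loop: a step adds the key of the new position to the key set
theorem pv_step_keys (houses : PySem.Dict String Int) (x y : Int) (c : Char) :
    (pvStepA (houses, x, y) c).1.keys
      = PySem.Set.add houses.keys (pvFmt (x + (pvD c).1) (y + (pvD c).2))
    ∧ (pvStepA (houses, x, y) c).2 = (x + (pvD c).1, y + (pvD c).2) := by
  have hmv := pv_move_eq x y c
  simp only [pvStepA, hmv]
  set k := pvFmt (x + (pvD c).1) (y + (pvD c).2) with hk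
  refine ⟨?_, trivial⟩
  by_cases hnone : (houses.get? k).isNone
  · have hne : houses.get? k = none := by
      cases hg : houses.get? k with
      | none => rfl
      | some v => rw [hg] at hnone; simp at hnone
    have hnm : k ∉ houses.keys := (PySem.Dict.get?_eq_none_iff_not_mem_keys houses k).mp hne
    have hcf : houses.contains k = false := by
      cases hc : houses.contains k with
      | false => rfl
      | true => exact absurd ((PySem.Dict.contains_iff_mem_keys houses k).mp hc) hnm
    simp [hnone, PySem.Dict.keys_insert_of_not_contains houses 0 hcf,
      PySem.Set.add_of_not_mem hnm]
  · have hnm : k ∈ houses.keys := by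
      by_contra hcon
      exact hnone (by rw [(PySem.Dict.get?_eq_none_iff_not_mem_keys houses k).mpr hcon]; rfl)
    simp [hnone, PySem.Set.add_of_mem hnm]

-- A's whole loop: keys = initial keys updated with the formatted positions after each move
theorem pv_foldA (cs : List Char) (houses : PySem.Dict String Int) (x y : Int) :
    (cs.foldl pvStepA (houses, x, y)).1.keys
      = PySem.Set.update houses.keys ((pvAfter cs x y).map (fun p => pvFmt p.1 p.2)) := by
  induction cs generalizing houses x y with
  | nil => simp [pvAfter, PySem.Set.update_nil]
  | cons c cs ih =>
    obtain ⟨h1, h2⟩ := pv_step_keys houses x y c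
    have hstep : pvStepA (houses, x, y) c
        = ((pvStepA (houses, x, y) c).1, (x + (pvD c).1, y + (pvD c).2)) := by
      rw [← h2]
    rw [List.foldl_cons, hstep, ih, pvAfter, List.map_cons, PySem.Set.update_cons, h1]

-- dedup commutes with map over an already-deduped list (no injectivity needed)
theorem pv_ofList_map_ofList {α β : Type} [BEq α] [LawfulBEq α] [BEq β] [LawfulBEq β]
    (f : α → β) (l : List α) :
    PySem.Set.ofList ((PySem.Set.ofList l).map f) = PySem.Set.ofList (l.map f) := by
  induction l using List.reverseRecOn with
  | nil => rfl
  | append_singleton l x ih =>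
    rw [PySem.Set.ofList_append_singleton]
    by_cases hx : x ∈ PySem.Set.ofList l
    · rw [PySem.Set.add_of_mem hx, ih, List.map_append, List.map_singleton,
        PySem.Set.ofList_append_singleton, PySem.Set.add_of_mem]
      rw [PySem.Set.mem_ofList] at hx ⊢
      exact List.mem_map_of_mem hx
    · rw [PySem.Set.add_of_not_mem hx, List.map_append, List.map_singleton,
        PySem.Set.ofList_append_singleton, ih, List.map_append, List.map_singleton,
        PySem.Set.ofList_append_singleton]

-- updating with a deduped list is updating with the list
theorem pv_update_ofList {α : Type} [BEq α] [LawfulBEq α] (s : PySem.Set α) (t : List α) :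
    PySem.Set.update s (PySem.Set.ofList t) = PySem.Set.update s t := by
  induction t using List.reverseRecOn generalizing s with
  | nil => rfl
  | append_singleton t x ih =>
    rw [PySem.Set.ofList_append_singleton, PySem.Set.update_append,
      PySem.Set.update_cons, PySem.Set.update_nil]
    by_cases hx : x ∈ PySem.Set.ofList t
    · rw [PySem.Set.add_of_mem hx, ih]
      have hxm : x ∈ PySem.Set.update s t := by
        rw [PySem.Set.mem_update]
        exact Or.inr ((PySem.Set.mem_ofList t x).mp hx)
      rw [PySem.Set.add_of_mem hxm]
    · rw [PySem.Set.add_of_not_mem hx, PySem.Set.update_append, ih,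
        PySem.Set.update_cons, PySem.Set.update_nil]

-- dropping a repeated element in the middle does not change the set
theorem pv_ofList_middle {α : Type} [BEq α] [LawfulBEq α] (xs ys : List α) {x : α}
    (hx : x ∈ xs) :
    PySem.Set.ofList (xs ++ x :: ys) = PySem.Set.ofList (xs ++ ys) := by
  rw [PySem.Set.ofList_append, PySem.Set.update_cons,
    PySem.Set.add_of_mem ((PySem.Set.mem_ofList xs x).mpr hx), ← PySem.Set.ofList_append]

-- the total displacement splits over append
theorem pv_del_append (a b : List Char) :
    pvDel (a ++ b) = ((pvDel a).1 + (pvDel b).1, (pvDel a).2 + (pvDel b).2) := by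
  induction a with
  | nil => simp [pvDel]
  | cons c a ih =>
    simp [pvDel, ih]
    constructor <;> ring

-- translating the start translates every visited position
theorem pv_pos_shift (b : List Char) (u v x y : Int) :
    pvPos b (u + x) (v + y) = (pvPos b x y).map (fun p => (u + p.1, v + p.2)) := by
  induction b generalizing x y with
  | nil => simp [pvPos, pvAfter]
  | cons c b ih =>
    rw [pvPos_cons, pvPos_cons, List.map_cons]
    have := ih (x + (pvD c).1) (y + (pvD c).2)
    rw [show u + x + (pvD c).1 = u + (x + (pvD c).1) by ring,
      show v + y + (pvD c).2 = v + (y + (pvD c).2) by ring, this]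

-- visited positions split over append
theorem pv_pos_append (a b : List Char) (x y : Int) :
    pvPos (a ++ b) x y
      = pvPos a x y ++ (pvPos b (x + (pvDel a).1) (y + (pvDel a).2)).tail := by
  induction a generalizing x y with
  | nil =>
    simp only [List.nil_append, pvDel]
    rw [show x + (0, (0:Int)).1 = x by simp, show y + (0, (0:Int)).2 = y by simp]
    rfl
  | cons c a ih =>
    rw [List.cons_append, pvPos_cons, pvPos_cons, List.cons_append, ih]
    have h1 : x + (pvD c).1 + (pvDel a).1 = x + (pvDel (c :: a)).1 := by
      simp [pvDel]; ring
    have h2 : y + (pvD c).2 + (pvDel a).2 = y + (pvDel (c :: a)).2 := by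
      simp [pvDel]; ring
    rw [h1, h2]

-- the endpoint is among the visited positions
theorem pv_del_mem (a : List Char) (x y : Int) :
    (x + (pvDel a).1, y + (pvDel a).2) ∈ pvPos a x y := by
  induction a generalizing x y with
  | nil => simp [pvPos, pvAfter, pvDel]
  | cons c a ih =>
    rw [pvPos_cons]
    refine List.mem_cons_of_mem _ ?_
    have := ih (x + (pvD c).1) (y + (pvD c).2)
    have h1 : x + (pvD c).1 + (pvDel a).1 = x + (pvDel (c :: a)).1 := by simp [pvDel]; ring
    have h2 : y + (pvD c).2 + (pvDel a).2 = y + (pvDel (c :: a)).2 := by simp [pvDel]; ring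
    rwa [h1, h2] at this

-- B's scan computes the displacement and the deduped visited-position list
theorem pv_scan_eq (cs : List Char) :
    pvScan cs = (pvDel cs, PySem.Set.ofList (pvPos cs 0 0)) := by
  induction cs using pvScan.induct with
  | case1 =>
    simp [pvScan, pvDel, pvPos, pvAfter]
  | case2 c =>
    have : pvDel [c] = pvD c := by
      simp [pvDel, pvD]
    simp [pvScan, this, pvPos, pvAfter, pvD]
  | case3 c1 c2 rest cs' mid' ihl ihr =>
    rw [pvScan, ihl, ihr]
    set cs := c1 :: c2 :: rest with hcs
    set mid := cs.length / 2 with hmid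
    set a := cs.take mid with ha
    set b := cs.drop mid with hb
    have hab : a ++ b = cs := List.take_append_drop mid cs
    have hdel : ((pvDel a).1 + (pvDel b).1, (pvDel a).2 + (pvDel b).2) = pvDel cs := by
      rw [← hab, pv_del_append]
    refine Prod.ext ?_ ?_
    · simpa using hdel
    · simp only [PySem.Set.union]
      have hshift : (pvPos b 0 0).map (fun p => ((pvDel a).1 + p.1, (pvDel a).2 + p.2))
          = pvPos b ((pvDel a).1) ((pvDel a).2) := by
        have := pv_pos_shift b (pvDel a).1 (pvDel a).2 0 0
        simpa using this.symm
      rw [pv_ofList_map_ofList, pv_update_ofList, hshift, ← PySem.Set.ofList_append]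
      have hhead : pvPos b (pvDel a).1 (pvDel a).2
          = ((pvDel a).1, (pvDel a).2) :: (pvPos b (pvDel a).1 (pvDel a).2).tail := rfl
      have hmem : ((pvDel a).1, (pvDel a).2) ∈ pvPos a 0 0 := by
        have := pv_del_mem a 0 0
        simpa using this
      have happ := pv_pos_append a b 0 0
      simp only [zero_add] at happ
      rw [hhead, pv_ofList_middle _ _ hmem, ← happ, hab]

-- ===== VERDICT (by name: the statement is the Claim_ definition above) =====
theorem deliver_spec : Claim_equal_deliver := by
  intro instructions _
  unfold Spec_deliver deliver deliver_alt
  rw [pv_scan_eq, pv_ofList_map_ofList]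
  rw [pv_foldA]
  have hkeys : (PySem.Dict.ofList [("(0,0)", (1 : Int))]).keys = [pvFmt 0 0] := by decide
  rw [hkeys]
  have h1 : ([pvFmt 0 0] : PySem.Set String) = PySem.Set.ofList [pvFmt 0 0] := by decide
  rw [h1, ← PySem.Set.ofList_append]
  have h2 : [pvFmt 0 0] ++ (pvAfter instructions.toList 0 0).map (fun p => pvFmt p.1 p.2)
      = (pvPos instructions.toList 0 0).map (fun p => pvFmt p.1 p.2) := by
    rfl
  rw [h2]
  rw [PySem.Set.ofList_eq_self_of_nodup _ (PySem.Set.nodup_ofList _)]
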